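-- pv_equiv track=rewrite | github.com/rawnoob25/SublistsAndPermutations | sublists.py | gen_2partition_sublist
-- ===== SOURCE A (Python) =====
-- def gen_2partition_sublist(L):
--     """
--     This function generates disjoint pairs of sublists of L. Each such pair is a tuple. The
--     function returns the list of all such tuples. The output
--     returned by this function can be used to answer the question: "How many different
--     pairs of knapsacks can be constructed from the function L such that
--     any element in the list may be absent from both knapsacks, or may be present
--     in either of the knapsacks (but never both).
--     """
--     n=len(L)
--     out=[]
--     for i in range(3**n):
--         knap1,knap2=[],[]
--         psn=0
--         k=i
--         while k>0:
--             #determine value of psn-th digit of base-3 representation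
--             #of k; if it's 1, add L[psn] to knap1; otherwise if it (psn-th digit) is 2, add
--             #L[psn] to knap2.
--             if k%3==1:
--                 knap1.append(L[psn])
--             elif k%3==2:
--                 knap2.append(L[psn])
--             else:
--                 pass
--             k//=3
--             psn+=1
--         out.append((knap1,knap2))
--     return out
-- ===== SOURCE B (Python) =====
-- def gen_2partition_sublist(L):
--     def rec(i):
--         if i == len(L):
--             return [([], [])]
--         sub = rec(i + 1)
--         out = []
--         for k1, k2 in sub:
--             out.append((list(k1), list(k2)))
--             out.append(([L[i]] + k1, list(k2)))
--             out.append((list(k1), [L[i]] + k2))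
--         return out
--     return rec(0)
-- ===== Notes on version B (the rewrite author's own statement) =====
-- stated objective: simpler
-- what changed: Replaces A's base-3 counter (loop over range(3**n) with an inner while loop decoding each counter value digit by digit) with a direct recursive enumeration over suffixes of L that emits the three placements (neither/knap1/knap2) of each element, preserving A's exact output order.
import Mathlib
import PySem

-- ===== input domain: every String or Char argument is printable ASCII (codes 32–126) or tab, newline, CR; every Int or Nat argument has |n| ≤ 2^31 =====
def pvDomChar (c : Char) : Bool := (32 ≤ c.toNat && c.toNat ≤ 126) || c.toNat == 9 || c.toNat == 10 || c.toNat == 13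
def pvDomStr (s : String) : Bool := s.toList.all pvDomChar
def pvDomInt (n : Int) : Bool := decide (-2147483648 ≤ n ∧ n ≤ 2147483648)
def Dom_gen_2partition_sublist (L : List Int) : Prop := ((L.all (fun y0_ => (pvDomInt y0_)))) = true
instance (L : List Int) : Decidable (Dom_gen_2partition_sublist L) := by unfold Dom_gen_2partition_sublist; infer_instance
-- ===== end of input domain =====

-- B replaces A's base-3 counter (outer range(3**n) loop + inner digit-extraction while loop)
-- by a recursive enumeration over suffixes of L that emits, for each assignment of the rest,
-- the three placements of the current element; objective: simpler (no arithmetic decoding).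

-- ===== PORT A =====
-- A's inner 'while k>0' loop: reads the psn-th base-3 digit of k and appends L[psn] to the
-- matching knapsack.  L[psn] is ported as (pyGet? L psn).getD 0: in A the index is always in
-- range (k < 3**len(L) so the loop runs at most len(L) times), so the default is never used.
def pvDigitsLoop (L : List Int) (k psn : Int) (knap1 knap2 : List Int) :
    List Int × List Int :=
  if h : k > 0 then
    if PySem.Int.mod k 3 = 1 then
      pvDigitsLoop L (PySem.Int.floordiv k 3) (psn + 1)
        (knap1 ++ [(PySem.List.pyGet? L psn).getD 0]) knap2
    else if PySem.Int.mod k 3 = 2 then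
      pvDigitsLoop L (PySem.Int.floordiv k 3) (psn + 1)
        knap1 (knap2 ++ [(PySem.List.pyGet? L psn).getD 0])
    else
      pvDigitsLoop L (PySem.Int.floordiv k 3) (psn + 1) knap1 knap2
  else (knap1, knap2)
termination_by k.toNat
decreasing_by
  all_goals
    · rw [PySem.Int.floordiv_eq_ediv_of_pos (by omega)]
      omega

def gen_2partition_sublist (L : List Int) : List (List Int × List Int) :=
  (PySem.List.pyRange 0 (3 ^ L.length : Nat) 1).foldl
    (fun out i => out ++ [pvDigitsLoop L i 0 [] []]) []

-- ===== PORT B =====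
-- Source B's rec(i) works on the suffix L[i:]; the port recurses on that suffix directly.
def pvRecAlt (M : List Int) : List (List Int × List Int) :=
  match M with
  | [] => [([], [])]
  | x :: rest =>
      (pvRecAlt rest).foldl
        (fun out p => out ++ [(p.1, p.2), (x :: p.1, p.2), (p.1, x :: p.2)]) []

def gen_2partition_sublist_alt (L : List Int) : List (List Int × List Int) :=
  pvRecAlt L

-- ===== PRECONDITION & SPEC =====
def Spec_gen_2partition_sublist (L : List Int) (out : List (List Int × List Int)) : Prop := out = gen_2partition_sublist_alt L
instance (L : List Int) (out : List (List Int × List Int)) : Decidable (Spec_gen_2partition_sublist L out) := by unfold Spec_gen_2partition_sublist; infer_instance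

-- ===== CLAIM (what is proved, stated in full; the proofs are below) =====
def Claim_equal_gen_2partition_sublist : Prop := ∀ (L : List Int), Dom_gen_2partition_sublist L → Spec_gen_2partition_sublist L (gen_2partition_sublist L)

-- ===== LEMMAS AND PROOFS =====

-- Unfolding equation for pvDigitsLoop (one step).
theorem pvDigitsLoop_eq (L : List Int) (k psn : Int) (k1 k2 : List Int) :
    pvDigitsLoop L k psn k1 k2 =
      if k > 0 then
        if PySem.Int.mod k 3 = 1 then
          pvDigitsLoop L (PySem.Int.floordiv k 3) (psn + 1)
            (k1 ++ [(PySem.List.pyGet? L psn).getD 0]) k2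
        else if PySem.Int.mod k 3 = 2 then
          pvDigitsLoop L (PySem.Int.floordiv k 3) (psn + 1)
            k1 (k2 ++ [(PySem.List.pyGet? L psn).getD 0])
        else
          pvDigitsLoop L (PySem.Int.floordiv k 3) (psn + 1) k1 k2
      else (k1, k2) := by
  rw [pvDigitsLoop]
  split <;> simp [*]

-- Index shift: starting at position psn+1 in (x :: rest) is starting at psn in rest.
theorem pvDigitsLoop_shift_fuel (x : Int) (rest : List Int) : ∀ (n : Nat) (k : Int),
    k.toNat ≤ n → ∀ (psn : Nat) (k1 k2 : List Int),
    pvDigitsLoop (x :: rest) k ((psn : Int) + 1) k1 k2 =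
      pvDigitsLoop rest k (psn : Int) k1 k2 := by
  intro n
  induction n with
  | zero =>
      intro k hk psn k1 k2
      have h : ¬ k > 0 := by omega
      conv_lhs => rw [pvDigitsLoop_eq]
      conv_rhs => rw [pvDigitsLoop_eq]
      simp [h]
  | succ n ih =>
      intro k hk psn k1 k2
      conv_lhs => rw [pvDigitsLoop_eq]
      conv_rhs => rw [pvDigitsLoop_eq]
      by_cases h : k > 0
      · have hdiv : (PySem.Int.floordiv k 3).toNat ≤ n := by
          rw [PySem.Int.floordiv_eq_ediv_of_pos (by omega)]
          omega
        have hcast : ((psn : Int) + 1) = ((psn + 1 : Nat) : Int) := by push_cast; ring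
        simp only [if_pos h, PySem.List.pyGet?_cons_succ]
        split_ifs <;>
          · rw [hcast]
            exact ih _ hdiv (psn + 1) _ _
      · simp [h]

theorem pvDigitsLoop_shift (x : Int) (rest : List Int) (k : Int) (psn : Nat)
    (k1 k2 : List Int) :
    pvDigitsLoop (x :: rest) k ((psn : Int) + 1) k1 k2 =
      pvDigitsLoop rest k (psn : Int) k1 k2 :=
  pvDigitsLoop_shift_fuel x rest k.toNat k le_rfl psn k1 k2

-- Accumulator lemma.
theorem pvDigitsLoop_acc_fuel (L : List Int) : ∀ (n : Nat) (k : Int), k.toNat ≤ n →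
    ∀ (psn : Int) (k1 k2 : List Int),
    pvDigitsLoop L k psn k1 k2 =
      (k1 ++ (pvDigitsLoop L k psn [] []).1, k2 ++ (pvDigitsLoop L k psn [] []).2) := by
  intro n
  induction n with
  | zero =>
      intro k hk psn k1 k2
      have h : ¬ k > 0 := by omega
      conv_lhs => rw [pvDigitsLoop_eq]
      conv_rhs => rw [pvDigitsLoop_eq]
      simp [h]
  | succ n ih =>
      intro k hk psn k1 k2
      by_cases h : k > 0
      · have hdiv : (PySem.Int.floordiv k 3).toNat ≤ n := by
          rw [PySem.Int.floordiv_eq_ediv_of_pos (by omega)]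
          omega
        conv_lhs => rw [pvDigitsLoop_eq]
        conv_rhs => rw [pvDigitsLoop_eq]
        simp only [if_pos h]
        split_ifs
        · rw [ih _ hdiv (psn + 1) (k1 ++ _) k2,
              ih _ hdiv (psn + 1) ([] ++ _) ([] : List Int)]
          try simp
        · rw [ih _ hdiv (psn + 1) k1 (k2 ++ _),
              ih _ hdiv (psn + 1) ([] : List Int) ([] ++ _)]
          try simp
        · rw [ih _ hdiv (psn + 1) k1 k2,
              ih _ hdiv (psn + 1) ([] : List Int) ([] : List Int)]
          try simp
      · conv_lhs => rw [pvDigitsLoop_eq]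
        conv_rhs => rw [pvDigitsLoop_eq]
        simp [h]

theorem pvDigitsLoop_acc (L : List Int) (k psn : Int) (k1 k2 : List Int) :
    pvDigitsLoop L k psn k1 k2 =
      (k1 ++ (pvDigitsLoop L k psn [] []).1, k2 ++ (pvDigitsLoop L k psn [] []).2) :=
  pvDigitsLoop_acc_fuel L k.toNat k le_rfl psn k1 k2

-- The three digit steps.
theorem pvDigitsLoop_three (x : Int) (rest : List Int) (q : Nat) :
    pvDigitsLoop (x :: rest) ((3 * q : Nat) : Int) 0 [] [] = pvDigitsLoop rest (q : Int) 0 [] []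
    ∧ pvDigitsLoop (x :: rest) ((3 * q + 1 : Nat) : Int) 0 [] [] =
        (x :: (pvDigitsLoop rest (q : Int) 0 [] []).1, (pvDigitsLoop rest (q : Int) 0 [] []).2)
    ∧ pvDigitsLoop (x :: rest) ((3 * q + 2 : Nat) : Int) 0 [] [] =
        ((pvDigitsLoop rest (q : Int) 0 [] []).1, x :: (pvDigitsLoop rest (q : Int) 0 [] []).2) := by
  have hshift : ∀ (k1 k2 : List Int),
      pvDigitsLoop (x :: rest) (q : Int) 1 k1 k2 = pvDigitsLoop rest (q : Int) 0 k1 k2 := by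
    intro k1 k2
    have := pvDigitsLoop_shift x rest (q : Int) 0 k1 k2
    simpa using this
  refine ⟨?_, ?_, ?_⟩
  · by_cases hq : q = 0
    · subst hq
      conv_lhs => rw [pvDigitsLoop_eq]
      conv_rhs => rw [pvDigitsLoop_eq]
      norm_num
    · have hpos : ((3 * q : Nat) : Int) > 0 := by push_cast; omega
      have hmod : PySem.Int.mod ((3 * q : Nat) : Int) 3 = 0 := by
        rw [PySem.Int.mod_eq_emod_of_pos (by omega)]; push_cast; omega
      have hfd : PySem.Int.floordiv ((3 * q : Nat) : Int) 3 = (q : Int) := by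
        rw [PySem.Int.floordiv_eq_ediv_of_pos (by omega)]; push_cast; omega
      conv_lhs => rw [pvDigitsLoop_eq]
      simp only [if_pos hpos, hmod, hfd]
      norm_num [hshift]
  · have hpos : ((3 * q + 1 : Nat) : Int) > 0 := by push_cast; omega
    have hmod : PySem.Int.mod ((3 * q + 1 : Nat) : Int) 3 = 1 := by
      rw [PySem.Int.mod_eq_emod_of_pos (by omega)]; push_cast; omega
    have hfd : PySem.Int.floordiv ((3 * q + 1 : Nat) : Int) 3 = (q : Int) := by
      rw [PySem.Int.floordiv_eq_ediv_of_pos (by omega)]; push_cast; omega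
    conv_lhs => rw [pvDigitsLoop_eq]
    simp only [if_pos hpos, hmod, hfd, PySem.List.pyGet?_zero_cons]
    norm_num
    rw [hshift]
    rw [pvDigitsLoop_acc rest (q : Int) 0 [x] []]
    simp
  · have hpos : ((3 * q + 2 : Nat) : Int) > 0 := by push_cast; omega
    have hmod : PySem.Int.mod ((3 * q + 2 : Nat) : Int) 3 = 2 := by
      rw [PySem.Int.mod_eq_emod_of_pos (by omega)]; push_cast; omega
    have hfd : PySem.Int.floordiv ((3 * q + 2 : Nat) : Int) 3 = (q : Int) := by
      rw [PySem.Int.floordiv_eq_ediv_of_pos (by omega)]; push_cast; omega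
    conv_lhs => rw [pvDigitsLoop_eq]
    simp only [if_pos hpos, hmod, hfd, PySem.List.pyGet?_zero_cons]
    norm_num
    rw [hshift]
    rw [pvDigitsLoop_acc rest (q : Int) 0 [] [x]]
    simp

-- range(3m) mapped, regrouped in blocks of three.
theorem range_mul_three_map {β : Type} (g : Nat → β) (m : Nat) :
    (List.range (3 * m)).map g =
      (List.range m).flatMap (fun q => [g (3 * q), g (3 * q + 1), g (3 * q + 2)]) := by
  induction m with
  | zero => simp
  | succ m ih =>
      have h3 : 3 * (m + 1) = (3 * m + 1) + 1 + 1 := by omega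
      rw [h3, List.range_succ, List.range_succ, List.range_succ, List.range_succ]
      simp [ih]

-- A's output as a map over List.range.
theorem genA_eq_map (L : List Int) :
    gen_2partition_sublist L =
      (List.range (3 ^ L.length)).map (fun i : Nat => pvDigitsLoop L (i : Int) 0 [] []) := by
  unfold gen_2partition_sublist
  rw [PySem.List.foldl_append_singleton_eq_map]
  rw [PySem.List.pyRange_zero_nat]
  rw [List.map_map]
  simp [Function.comp_def]

-- generic loop shape used by pvRecAlt_cons
theorem pvFoldlAppend {α β : Type} (l : List α) (g : α → List β) (acc : List β) :
    l.foldl (fun out p => out ++ g p) acc = acc ++ l.flatMap g := by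
  induction l generalizing acc with
  | nil => simp
  | cons a l ih => simp [ih, List.append_assoc]

-- B's step as flatMap.
theorem pvRecAlt_cons (x : Int) (rest : List Int) :
    pvRecAlt (x :: rest) =
      (pvRecAlt rest).flatMap (fun p => [(p.1, p.2), (x :: p.1, p.2), (p.1, x :: p.2)]) := by
  show (pvRecAlt rest).foldl _ [] = _
  rw [pvFoldlAppend (pvRecAlt rest) (fun p => [(p.1, p.2), (x :: p.1, p.2), (p.1, x :: p.2)]) []]
  simp

-- Main equivalence of the two enumerations.
theorem main_eq (L : List Int) : gen_2partition_sublist L = pvRecAlt L := by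
  induction L with
  | nil =>
      rw [genA_eq_map]
      have h : pvDigitsLoop [] 0 0 [] [] = ([], []) := by
        rw [pvDigitsLoop_eq]; norm_num
      simp [pvRecAlt, h]
  | cons x rest ih =>
      rw [genA_eq_map, pvRecAlt_cons, ← ih, genA_eq_map]
      rw [show (3 : Nat) ^ (x :: rest).length = 3 * 3 ^ rest.length from by
        simp [pow_succ]; ring]
      rw [range_mul_three_map]
      rw [List.flatMap_map]
      apply List.flatMap_congr
      intro q _
      obtain ⟨h0, h1, h2⟩ := pvDigitsLoop_three x rest q
      push_cast at h0 h1 h2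
      simp [h0, h1, h2]

-- ===== VERDICT (by name: the statement is the Claim_ definition above) =====
theorem gen_2partition_sublist_spec : Claim_equal_gen_2partition_sublist := by
  intro L _
  unfold Spec_gen_2partition_sublist gen_2partition_sublist_alt
  exact main_eq L
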